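-- pv_equiv track=rewrite | github.com/Emanuel-de-Jong/MIDI-To-Strudel | Midi-to-Strudel.py | simplify_subdivisions
-- ===== SOURCE A (Python) =====
-- def simplify_subdivisions(subdivs):
--     current = subdivs
--     while len(current) % 2 == 0:
--         pairs = list(zip(current[::2], current[1::2]))
--         if any(second != '-' for _, second in pairs):
--             break
--
--         current = [first for first, _ in pairs]
--
--     return current
-- ===== SOURCE B (Python) =====
-- def simplify_subdivisions(subdivs):
--     stride = 1
--     n = len(subdivs)
--     while n % 2 == 0:
--         if any(subdivs[i] != '-' for i in range(stride, len(subdivs), 2 * stride)):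
--             break
--         stride *= 2
--         n //= 2
--     return subdivs if stride == 1 else [subdivs[i] for i in range(0, len(subdivs), stride)]
-- ===== Notes on version B (the rewrite author's own statement) =====
-- stated objective: alternative
-- what changed: B never builds the intermediate halved lists: it keeps an integer stride and remaining length, tests the odd strided positions of the ORIGINAL list each round, and materialises a single strided selection (or returns the input unchanged) at the end.
import Mathlib
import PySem

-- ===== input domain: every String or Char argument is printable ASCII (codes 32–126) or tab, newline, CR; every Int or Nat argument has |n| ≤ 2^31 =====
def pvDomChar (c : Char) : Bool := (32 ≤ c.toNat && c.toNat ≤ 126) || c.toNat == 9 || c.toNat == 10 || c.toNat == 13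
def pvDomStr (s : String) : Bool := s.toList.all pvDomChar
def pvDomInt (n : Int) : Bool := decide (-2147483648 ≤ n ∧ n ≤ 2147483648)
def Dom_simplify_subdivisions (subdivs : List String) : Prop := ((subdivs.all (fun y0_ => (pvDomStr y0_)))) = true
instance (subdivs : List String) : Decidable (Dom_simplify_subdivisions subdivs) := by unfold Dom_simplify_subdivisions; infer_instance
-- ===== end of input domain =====

-- B replaces A's repeated rebuilding of halved lists by an integer stride and one final strided
-- selection over the original list (objective: alternative decomposition, same asymptotic cost).

-- ===== PORT A =====
-- current[::2] is ported by hand as pvEvens (exact: the elements at even indices);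
-- current[1::2] is pvEvens current.tail (exact: the elements at odd indices).
def pvEvens {α : Type} : List α → List α
  | [] => []
  | [a] => [a]
  | a :: _ :: t => a :: pvEvens t

-- the Python while-loop; the fuel only makes it structurally terminating (on nonempty input,
-- subdivs.length units of fuel exceed the number of halvings; both Pythons diverge on [],
-- where both ports return []).
def pvGoA (fuel : Nat) (current : List String) : List String :=
  match fuel with
  | 0 => current
  | fuel + 1 =>
    if current.length % 2 = 0 then
      let pairs := (pvEvens current).zip (pvEvens current.tail)
      if pairs.any (fun p => p.2 != "-") then current
      else pvGoA fuel (pairs.map Prod.fst)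
    else current

def simplify_subdivisions (subdivs : List String) : List String :=
  pvGoA subdivs.length subdivs

-- ===== PORT B =====
-- any(subdivs[i] != '-' for i in range(stride, len(subdivs), 2*stride))
def pvAnyStride (xs : List String) (s : Nat) : Bool :=
  (PySem.List.pyRange (s : Int) (xs.length : Int) ((2 * s : Nat) : Int)).any
    (fun i => PySem.List.pyGetD xs i "" != "-")

-- the while-loop of Source B over (stride, n); fuel as in pvGoA
def pvGoB (fuel : Nat) (xs : List String) (s n : Nat) : Nat :=
  match fuel with
  | 0 => s
  | fuel + 1 =>
    if n % 2 = 0 then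
      if pvAnyStride xs s then s
      else pvGoB fuel xs (2 * s) (n / 2)
    else s

def simplify_subdivisions_alt (subdivs : List String) : List String :=
  let stride := pvGoB subdivs.length subdivs 1 subdivs.length
  if stride = 1 then subdivs
  else (PySem.List.pyRange 0 (subdivs.length : Int) (stride : Int)).map
    (fun i => PySem.List.pyGetD subdivs i "")

-- ===== PRECONDITION & SPEC =====
def Spec_simplify_subdivisions (subdivs : List String) (out : List String) : Prop := out = simplify_subdivisions_alt subdivs
instance (subdivs : List String) (out : List String) : Decidable (Spec_simplify_subdivisions subdivs out) := by unfold Spec_simplify_subdivisions; infer_instance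

-- ===== CLAIM (what is proved, stated in full; the proofs are below) =====
def Claim_equal_simplify_subdivisions : Prop := ∀ (subdivs : List String), Dom_simplify_subdivisions subdivs → Spec_simplify_subdivisions subdivs (simplify_subdivisions subdivs)

-- ===== LEMMAS AND PROOFS =====

-- range with a positive step: nil and cons unfoldings (for steps other than ±1)
lemma pvRange_pos_nil (a b s : Int) (hs : 0 < s) (hab : b ≤ a) :
    PySem.List.pyRange a b s = [] := by
  rw [PySem.List.pyRange_of_pos a b hs, if_neg (by omega)]
  simp

lemma pvRange_pos_cons (a b s : Int) (hs : 0 < s) (hab : a < b) :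
    PySem.List.pyRange a b s = a :: PySem.List.pyRange (a + s) b s := by
  rw [PySem.List.pyRange_of_pos a b hs, PySem.List.pyRange_of_pos (a+s) b hs]
  by_cases h2 : a + s < b
  · rw [if_pos hab, if_pos h2]
    have hnn : 0 ≤ (b - (a + s) + s - 1) / s := Int.ediv_nonneg (by omega) (by omega)
    have hstep : (b - a + s - 1) / s = (b - (a + s) + s - 1) / s + 1 := by
      have := Int.add_mul_ediv_right (b - (a+s) + s - 1) 1 (c := s) (by omega)
      simp at this
      rw [← this]; ring_nf
    have hc : ((b - a + s - 1) / s).toNat = ((b - (a + s) + s - 1) / s).toNat + 1 := by omega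
    rw [hc, List.range_succ_eq_map]
    simp [List.map_map, Function.comp]
    intro k _
    ring
  · rw [if_pos hab, if_neg (by omega)]
    have hc : (b - a + s - 1) / s = 1 := by
      rw [← PySem.Int.floordiv_eq_ediv_of_pos (b := s) hs,
          PySem.Int.floordiv_eq_iff_of_pos (b := s) hs]
      omega
    rw [hc]
    simp

lemma pvRange_pos_tail (a b s : Int) (hs : 0 < s) :
    (PySem.List.pyRange a b s).tail = PySem.List.pyRange (a + s) b s := by
  by_cases hab : a < b
  · rw [pvRange_pos_cons a b s hs hab]
    simp
  · rw [pvRange_pos_nil a b s hs (by omega), pvRange_pos_nil (a + s) b s hs (by omega)]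
    simp

lemma pvEvens_length {α : Type} (l : List α) : (pvEvens l).length = (l.length + 1) / 2 := by
  induction l using pvEvens.induct with
  | case1 => simp [pvEvens]
  | case2 a => simp [pvEvens]
  | case3 a b t ih => simp [pvEvens, ih]; omega

-- taking every second element of a strided range doubles the stride
lemma pvEvens_map_range {β : Type} (f : Int → β) (s : Int) (hs : 0 < s) (a b : Int) :
    pvEvens ((PySem.List.pyRange a b s).map f) = (PySem.List.pyRange a b (2 * s)).map f := by
  by_cases hn : (b - a).toNat = 0
  · rw [pvRange_pos_nil a b s hs (by omega), pvRange_pos_nil a b (2*s) (by omega) (by omega)]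
    simp [pvEvens]
  · generalize hN : (b - a).toNat = N at *
    induction N using Nat.strong_induction_on generalizing a with
    | _ N ih =>
      have hab : a < b := by omega
      rw [pvRange_pos_cons a b s hs hab, pvRange_pos_cons a b (2*s) (by omega) hab]
      by_cases h2 : a + s < b
      · rw [pvRange_pos_cons (a+s) b s hs h2]
        simp only [List.map_cons, pvEvens]
        have e : a + 2*s = a + s + s := by ring
        rw [e]
        by_cases h3 : a + s + s < b
        · have harg : (b - (a + s + s)).toNat < N := by omega
          have := ih _ harg (a + s + s) rfl (by omega)
          rw [this]
        · rw [pvRange_pos_nil (a+s+s) b s hs (by omega),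
              pvRange_pos_nil (a+s+s) b (2*s) (by omega) (by omega)]
          simp [pvEvens]
      · have e : a + 2*s = a + s + s := by ring
        rw [e]
        rw [pvRange_pos_nil (a+s) b s hs (by omega),
            pvRange_pos_nil (a+s+s) b (2*s) (by omega) (by omega)]
        simp [pvEvens]

lemma pvTail_map {α β : Type} (f : α → β) (l : List α) : (l.map f).tail = l.tail.map f := by
  cases l <;> simp

-- the two loops agree, in lockstep, for every amount of fuel
lemma pvLoop (xs : List String) : ∀ (fuel s n : Nat) (cur : List String), 0 < s →
    cur = (PySem.List.pyRange 0 (xs.length : Int) (s : Int)).map (fun i => PySem.List.pyGetD xs i "") →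
    cur.length = n →
    pvGoA fuel cur =
      (PySem.List.pyRange 0 (xs.length : Int) ((pvGoB fuel xs s n : Nat) : Int)).map
        (fun i => PySem.List.pyGetD xs i "") := by
  intro fuel
  induction fuel with
  | zero =>
    intro s n cur hs hcur hlen
    simpa [pvGoA, pvGoB] using hcur
  | succ fuel ih =>
    intro s n cur hs hcur hlen
    simp only [pvGoA, pvGoB, hlen]
    by_cases hpar : n % 2 = 0
    · rw [if_pos hpar, if_pos hpar]
      have hs' : (0:Int) < (s:Int) := by exact_mod_cast hs
      have hcast : ((2 * s : Nat) : Int) = 2 * (s : Int) := by push_cast; ring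
      have h_evens : pvEvens cur =
          (PySem.List.pyRange 0 (xs.length : Int) ((2 * s : Nat) : Int)).map
            (fun i => PySem.List.pyGetD xs i "") := by
        rw [hcur, pvEvens_map_range _ (s : Int) hs' 0 (xs.length : Int), hcast]
      have h_odds : pvEvens cur.tail =
          (PySem.List.pyRange (s : Int) (xs.length : Int) ((2 * s : Nat) : Int)).map
            (fun i => PySem.List.pyGetD xs i "") := by
        rw [hcur, pvTail_map, pvRange_pos_tail 0 (xs.length : Int) (s : Int) hs',
            show (0:Int) + (s:Int) = (s:Int) by ring,
            pvEvens_map_range _ (s : Int) hs' (s : Int) (xs.length : Int), hcast]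
      have hlen_e : (pvEvens cur).length = n / 2 := by
        rw [pvEvens_length, hlen]; omega
      have hlen_o : (pvEvens cur.tail).length = n / 2 := by
        rw [pvEvens_length, List.length_tail, hlen]; omega
      have hmapsnd : ((pvEvens cur).zip (pvEvens cur.tail)).map Prod.snd = pvEvens cur.tail :=
        List.map_snd_zip (by omega)
      have hmapfst : ((pvEvens cur).zip (pvEvens cur.tail)).map Prod.fst = pvEvens cur :=
        List.map_fst_zip (by omega)
      have hcond : ((pvEvens cur).zip (pvEvens cur.tail)).any (fun p => p.2 != "-") =
          pvAnyStride xs s := by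
        rw [show (fun (p : String × String) => p.2 != "-") =
              ((fun x => x != "-") ∘ Prod.snd) from rfl,
            ← List.any_map, hmapsnd, h_odds, List.any_map, pvAnyStride]
        rfl
      rw [hcond]
      by_cases hbrk : pvAnyStride xs s = true
      · rw [if_pos hbrk, if_pos hbrk]
        exact hcur
      · rw [if_neg hbrk, if_neg hbrk, hmapfst]
        exact ih (2 * s) (n / 2) (pvEvens cur) (by omega) h_evens hlen_e
    · rw [if_neg hpar, if_neg hpar]
      exact hcur

-- ===== VERDICT (by name: the statement is the Claim_ definition above) =====
theorem simplify_subdivisions_spec : Claim_equal_simplify_subdivisions := by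
  intro subdivs _
  unfold Spec_simplify_subdivisions simplify_subdivisions simplify_subdivisions_alt
  have hbase : subdivs =
      (PySem.List.pyRange 0 (subdivs.length : Int) ((1 : Nat) : Int)).map
        (fun i => PySem.List.pyGetD subdivs i "") := by
    have := PySem.List.map_pyGetD_pyRange_zero' subdivs ""
    simpa using this.symm
  have hloop := pvLoop subdivs subdivs.length 1 subdivs.length subdivs (by omega)
    hbase rfl
  rw [hloop]
  by_cases hstr : pvGoB subdivs.length subdivs 1 subdivs.length = 1
  · rw [hstr]
    rw [if_pos rfl]
    exact (by simpa using hbase.symm)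
  · simp only [if_neg hstr]
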